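-- pv_equiv track=rewrite | github.com/Block-Bench/base | strategies/sanitize/sanitize_on_minimal_sanitize.py | find_matching_identifier
-- ===== SOURCE A (Python) =====
-- def find_matching_identifier(old_name: str, actual_identifiers: list, rename_mappings: dict) -> str:
--     """
--     Find the actual identifier in sanitized code that corresponds to old_name.
--
--     This function handles the case where the rename_mappings might not have
--     a direct entry for old_name, but the transformation can be inferred.
--
--     Args:
--         old_name: The original identifier name from metadata
--         actual_identifiers: List of actual identifiers found in sanitized code
--         rename_mappings: The rename mappings from sanitize_code()
--
--     Returns:
--         The matching identifier from actual_identifiers, or old_name if no match found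
--     """
--     # 1. Direct lookup in rename_mappings
--     if old_name in rename_mappings:
--         renamed = rename_mappings[old_name]
--         if renamed in actual_identifiers:
--             return renamed
--
--     # 2. Check if old_name exists unchanged in actual_identifiers
--     if old_name in actual_identifiers:
--         return old_name
--
--     # 3. Try to find a matching identifier by checking if any actual identifier
--     #    could be a transformation of old_name
--     #    (e.g., FixedFloatHotWallet -> FloatHotWalletV2)
--     old_name_lower = old_name.lower()
--
--     for actual in actual_identifiers:
--         actual_lower = actual.lower()
--
--         # Check if they share a significant common substring (at least 5 chars)
--         # This handles cases like FixedFloatHotWallet -> FloatHotWalletV2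
--         for i in range(len(old_name_lower) - 4):
--             substring = old_name_lower[i:i+5]
--             if substring in actual_lower:
--                 # Found a likely match
--                 return actual
--
--     # 4. Check rename_mappings values - maybe old_name was transformed
--     #    through a chain of renames
--     for orig, renamed in rename_mappings.items():
--         if orig.lower() in old_name.lower() or old_name.lower() in orig.lower():
--             if renamed in actual_identifiers:
--                 return renamed
--
--     # 5. Return first actual identifier as fallback (usually the main contract)
--     if actual_identifiers:
--         return actual_identifiers[0]
--
--     return old_name
-- ===== SOURCE B (Python) =====
-- def find_matching_identifier(old_name: str, actual_identifiers: list, rename_mappings: dict) -> str: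
--     # One hash set for all membership tests over the candidate list.
--     actual_set = set(actual_identifiers)
--
--     # 1. Direct lookup (dict.get instead of test-then-index).
--     renamed = rename_mappings.get(old_name)
--     if renamed is not None and renamed in actual_set:
--         return renamed
--
--     # 2. Unchanged identifier.
--     if old_name in actual_set:
--         return old_name
--
--     # 3. Precompute the set of old_name's lowercased 5-grams once; slide a
--     #    5-char window over each candidate testing hash-set membership.
--     old_lower = old_name.lower()
--     grams = {old_lower[i:i+5] for i in range(len(old_lower) - 4)}
--     hit = next((a for a in actual_identifiers
--                 if any(a.lower()[j:j+5] in grams for j in range(len(a) - 4))), None)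
--     if hit is not None:
--         return hit
--
--     # 4. Chain-of-renames heuristic as a single generator search.
--     hit = next((r for o, r in rename_mappings.items()
--                 if (o.lower() in old_lower or old_lower in o.lower()) and r in actual_set),
--                None)
--     if hit is not None:
--         return hit
--
--     # 5. Fallback.
--     return next(iter(actual_identifiers), old_name)
-- ===== Notes on version B (the rewrite author's own statement) =====
-- stated objective: faster
-- what changed: Step 3 no longer runs a substring search over each candidate for every 5-gram of old_name: B builds the hash set of old_name's lowercased 5-grams once and slides a 5-char window over each candidate testing set membership; all list-membership tests go through one precomputed hash set of the candidates, and steps 3-5 are written as first-match generator searches instead of nested loops with early returns.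
import Mathlib
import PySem

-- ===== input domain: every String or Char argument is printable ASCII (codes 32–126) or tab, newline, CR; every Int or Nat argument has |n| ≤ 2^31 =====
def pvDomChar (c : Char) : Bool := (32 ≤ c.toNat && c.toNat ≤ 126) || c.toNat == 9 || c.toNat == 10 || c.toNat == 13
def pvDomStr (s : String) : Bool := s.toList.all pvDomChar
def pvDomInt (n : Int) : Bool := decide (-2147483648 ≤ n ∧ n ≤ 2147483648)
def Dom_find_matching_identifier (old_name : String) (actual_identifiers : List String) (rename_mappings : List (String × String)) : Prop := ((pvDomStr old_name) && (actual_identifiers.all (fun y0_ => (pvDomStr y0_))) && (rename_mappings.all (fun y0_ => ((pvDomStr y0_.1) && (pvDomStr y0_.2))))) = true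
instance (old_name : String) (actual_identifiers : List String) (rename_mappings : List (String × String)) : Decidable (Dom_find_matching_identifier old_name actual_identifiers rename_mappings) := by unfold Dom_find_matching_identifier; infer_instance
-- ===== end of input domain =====

-- B precomputes the set of old_name's 5-grams once and slides a window over each
-- candidate (set membership) instead of A's substring search per 5-gram per
-- candidate, and replaces A's nested early-return loops by first-match searches;
-- return value only, no side effects.

-- ===== PORT A =====
-- step 3 of A: first actual sharing a 5-char substring with old_name_lower
def pvA_scan (old_name_lower : List Char) : List String → Option String
  | [] => none
  | actual :: rest =>
    let actual_lower := PySem.Chars.lower actual.toList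
    if (PySem.List.pyRange 0 (PySem.List.len old_name_lower - 4) 1).any
        (fun i => PySem.Chars.isIn (PySem.List.slice old_name_lower (some i) (some (i + 5))) actual_lower)
    then some actual
    else pvA_scan old_name_lower rest

-- step 4 of A: chain-of-renames heuristic over the dict's items
def pvA_chain (old_name : String) (actual_identifiers : List String) : List (String × String) → Option String
  | [] => none
  | (orig, renamed) :: rest =>
    if PySem.Chars.isIn (PySem.Chars.lower orig.toList) (PySem.Chars.lower old_name.toList)
       || PySem.Chars.isIn (PySem.Chars.lower old_name.toList) (PySem.Chars.lower orig.toList)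
    then if actual_identifiers.contains renamed then some renamed
         else pvA_chain old_name actual_identifiers rest
    else pvA_chain old_name actual_identifiers rest

def find_matching_identifier (old_name : String) (actual_identifiers : List String) (rename_mappings : List (String × String)) : String :=
  let d := PySem.Dict.ofList rename_mappings
  let step1 : Option String :=
    match d.get? old_name with
    | some renamed => if actual_identifiers.contains renamed then some renamed else none
    | none => none
  match step1 with
  | some r => r
  | none =>
    if actual_identifiers.contains old_name then old_name
    else
      let old_name_lower := PySem.Chars.lower old_name.toList
      match pvA_scan old_name_lower actual_identifiers with
      | some r => r
      | none =>
        match pvA_chain old_name actual_identifiers d.items with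
        | some r => r
        | none =>
          match actual_identifiers with
          | a :: _ => a
          | [] => old_name

-- ===== PORT B =====
-- the set of 5-grams of old_lower (Python set comprehension)
def pvB_grams (old_lower : List Char) : PySem.Set (List Char) :=
  PySem.Set.ofList ((PySem.List.pyRange 0 (PySem.List.len old_lower - 4) 1).map
    (fun i => PySem.List.slice old_lower (some i) (some (i + 5))))

-- B's step-3 predicate: does candidate a carry some window in grams?
def pvB_hasGram (grams : PySem.Set (List Char)) (a : String) : Bool :=
  let al := PySem.Chars.lower a.toList
  (PySem.List.pyRange 0 (PySem.List.len al - 4) 1).any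
    (fun j => PySem.Set.contains grams (PySem.List.slice al (some j) (some (j + 5))))

-- B's step-4 predicate on one (orig, renamed) item
def pvB_chainPred (old_lower : List Char) (actual_set : PySem.Set String) (p : String × String) : Bool :=
  let ol := PySem.Chars.lower p.1.toList
  (PySem.Chars.isIn ol old_lower || PySem.Chars.isIn old_lower ol)
    && PySem.Set.contains actual_set p.2

def find_matching_identifier_alt (old_name : String) (actual_identifiers : List String) (rename_mappings : List (String × String)) : String :=
  let actual_set := PySem.Set.ofList actual_identifiers
  let direct : Option String :=
    ((PySem.Dict.ofList rename_mappings).get? old_name).filter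
      (fun r => PySem.Set.contains actual_set r)
  direct.getD <|
    if PySem.Set.contains actual_set old_name then old_name
    else
      let old_lower := PySem.Chars.lower old_name.toList
      let grams := pvB_grams old_lower
      ((actual_identifiers.find? (pvB_hasGram grams)).or
        ((((PySem.Dict.ofList rename_mappings).items.find?
            (pvB_chainPred old_lower actual_set)).map Prod.snd).or
          actual_identifiers.head?)).getD old_name

-- ===== PRECONDITION & SPEC =====
def Spec_find_matching_identifier (old_name : String) (actual_identifiers : List String) (rename_mappings : List (String × String)) (out : String) : Prop := out = find_matching_identifier_alt old_name actual_identifiers rename_mappings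
instance (old_name : String) (actual_identifiers : List String) (rename_mappings : List (String × String)) (out : String) : Decidable (Spec_find_matching_identifier old_name actual_identifiers rename_mappings out) := by unfold Spec_find_matching_identifier; infer_instance

-- ===== CLAIM (what is proved, stated in full; the proofs are below) =====
def Claim_equal_find_matching_identifier : Prop := ∀ (old_name : String) (actual_identifiers : List String) (rename_mappings : List (String × String)), Dom_find_matching_identifier old_name actual_identifiers rename_mappings → Spec_find_matching_identifier old_name actual_identifiers rename_mappings (find_matching_identifier old_name actual_identifiers rename_mappings)

-- ===== LEMMAS AND PROOFS =====

lemma pv_set_contains (xs : List String) (x : String) :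
    PySem.Set.contains (PySem.Set.ofList xs) x = xs.contains x := by
  rw [Bool.eq_iff_iff, PySem.Set.contains_iff, PySem.Set.mem_ofList, List.contains_iff_mem]

lemma pv_slice5 (xs : List Char) (i : Int) (h0 : 0 ≤ i) (hlt : i < PySem.List.len xs - 4) :
    (PySem.List.slice xs (some i) (some (i + 5))).length = 5 := by
  rw [PySem.List.slice_toNat xs h0 (by omega)]
  simp only [PySem.List.len_eq] at hlt
  simp
  omega

lemma pv_infix5 (sub al : List Char) (h5 : sub.length = 5) :
    PySem.Chars.isIn sub al = true ↔
      ∃ j : Int, 0 ≤ j ∧ j < PySem.List.len al - 4 ∧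
        PySem.List.slice al (some j) (some (j + 5)) = sub := by
  rw [← PySem.Chars.exists_prefix_drop_iff_isIn]
  constructor
  · rintro ⟨j, hpre⟩
    have hlen : sub.length ≤ (al.drop j).length := hpre.length_le
    rw [h5, List.length_drop] at hlen
    have hs : PySem.List.slice al (some (j:Int)) (some ((j:Int) + 5)) = (al.drop j).take 5 := by
      have h := PySem.List.slice_natCast_add al j 5
      push_cast at h
      exact h
    refine ⟨(j:Int), by positivity, by simp [PySem.List.len_eq]; omega, ?_⟩
    rw [hs]
    have := List.prefix_iff_eq_take.mp hpre
    rw [h5] at this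
    exact this.symm
  · rintro ⟨j, h0, hlt, hslice⟩
    refine ⟨j.toNat, ?_⟩
    have hs : PySem.List.slice al (some j) (some (j + 5)) = (al.drop j.toNat).take 5 := by
      have h := PySem.List.slice_natCast_add al j.toNat 5
      push_cast [Int.toNat_of_nonneg h0] at h
      exact h
    rw [hs] at hslice
    rw [← hslice]
    exact List.take_prefix 5 _

lemma pv_mem_grams (oldL x : List Char) :
    x ∈ pvB_grams oldL ↔
      ∃ i : Int, 0 ≤ i ∧ i < PySem.List.len oldL - 4 ∧
        PySem.List.slice oldL (some i) (some (i + 5)) = x := by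
  unfold pvB_grams
  rw [PySem.Set.mem_ofList]
  simp only [List.mem_map, PySem.List.mem_pyRange_one]
  constructor
  · rintro ⟨i, ⟨h0, hlt⟩, he⟩; exact ⟨i, h0, hlt, he⟩
  · rintro ⟨i, h0, hlt, he⟩; exact ⟨i, ⟨h0, hlt⟩, he⟩

lemma pv_cond_eq (oldL : List Char) (a : String) :
    (PySem.List.pyRange 0 (PySem.List.len oldL - 4) 1).any
        (fun i => PySem.Chars.isIn (PySem.List.slice oldL (some i) (some (i + 5)))
          (PySem.Chars.lower a.toList))
      = pvB_hasGram (pvB_grams oldL) a := by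
  unfold pvB_hasGram
  rw [Bool.eq_iff_iff]
  simp only [List.any_eq_true, PySem.List.mem_pyRange_one]
  constructor
  · rintro ⟨i, ⟨h0, hlt⟩, hin⟩
    obtain ⟨j, hj0, hjlt, hslice⟩ :=
      (pv_infix5 _ _ (pv_slice5 oldL i h0 hlt)).mp hin
    refine ⟨j, ⟨hj0, hjlt⟩, ?_⟩
    exact (PySem.Set.contains_iff _ _).mpr ((pv_mem_grams oldL _).mpr ⟨i, h0, hlt, hslice.symm⟩)
  · rintro ⟨j, ⟨hj0, hjlt⟩, hc⟩
    obtain ⟨i, hi0, hilt, heq⟩ := (pv_mem_grams oldL _).mp ((PySem.Set.contains_iff _ _).mp hc)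
    refine ⟨i, ⟨hi0, hilt⟩, ?_⟩
    exact (pv_infix5 _ _ (pv_slice5 oldL i hi0 hilt)).mpr ⟨j, hj0, hjlt, heq.symm⟩

lemma pv_scan_eq (oldL : List Char) (acts : List String) :
    pvA_scan oldL acts = acts.find? (pvB_hasGram (pvB_grams oldL)) := by
  induction acts with
  | nil => rfl
  | cons a rest ih =>
    rw [pvA_scan, pv_cond_eq oldL a, List.find?_cons]
    cases pvB_hasGram (pvB_grams oldL) a <;> simp [ih]

lemma pv_chain_eq (old_name : String) (acts : List String) (items : List (String × String)) :
    pvA_chain old_name acts items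
      = (items.find? (pvB_chainPred (PySem.Chars.lower old_name.toList) (PySem.Set.ofList acts))).map Prod.snd := by
  induction items with
  | nil => rfl
  | cons p rest ih =>
    obtain ⟨orig, renamed⟩ := p
    have hp : pvB_chainPred (PySem.Chars.lower old_name.toList) (PySem.Set.ofList acts) (orig, renamed)
        = ((PySem.Chars.isIn (PySem.Chars.lower orig.toList) (PySem.Chars.lower old_name.toList)
            || PySem.Chars.isIn (PySem.Chars.lower old_name.toList) (PySem.Chars.lower orig.toList))
           && acts.contains renamed) := by
      simp [pvB_chainPred]
    rw [pvA_chain, List.find?_cons, hp]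
    by_cases h1 : (PySem.Chars.isIn (PySem.Chars.lower orig.toList) (PySem.Chars.lower old_name.toList)
       || PySem.Chars.isIn (PySem.Chars.lower old_name.toList) (PySem.Chars.lower orig.toList)) = true
    · by_cases h2 : renamed ∈ acts <;> simp [h1, h2, ih]
    · simp only [Bool.not_eq_true] at h1
      simp [h1, ih]

-- ===== VERDICT (by name: the statement is the Claim_ definition above) =====
theorem find_matching_identifier_spec : Claim_equal_find_matching_identifier := by
  intro old_name acts rm _
  unfold Spec_find_matching_identifier find_matching_identifier find_matching_identifier_alt
  simp only [pv_scan_eq, pv_chain_eq, pv_set_contains]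
  rcases (PySem.Dict.ofList rm).get? old_name with _ | r
  · by_cases h2 : old_name ∈ acts
    · simp [Option.filter, h2]
    · rcases hs : acts.find? (pvB_hasGram (pvB_grams (PySem.Chars.lower old_name.toList))) with _ | r1
      · rcases hc : ((PySem.Dict.ofList rm).items.find?
            (pvB_chainPred (PySem.Chars.lower old_name.toList) (PySem.Set.ofList acts))) with _ | p
        · cases acts <;> simp_all [Option.filter]
        · simp_all [Option.filter]
      · simp_all [Option.filter]
  · by_cases h : r ∈ acts
    · simp [Option.filter, h]
    · by_cases h2 : old_name ∈ acts
      · simp [Option.filter, h, h2]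
      · rcases hs : acts.find? (pvB_hasGram (pvB_grams (PySem.Chars.lower old_name.toList))) with _ | r1
        · rcases hc : ((PySem.Dict.ofList rm).items.find?
              (pvB_chainPred (PySem.Chars.lower old_name.toList) (PySem.Set.ofList acts))) with _ | p
          · cases acts <;> simp_all [Option.filter]
          · simp_all [Option.filter]
        · simp_all [Option.filter]
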